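-- pv_equiv track=rewrite | github.com/mitchwagner/prp | pipeline.py | flatten_fold_predictions
-- ===== SOURCE A (Python) =====
-- def flatten_fold_predictions(xs):
--     '''
--     I need to decompose and re-group these predictions by weight
--
--     1)
--     [[{(edge, weight)}]] -> [((edge, weight), fold)]
--     [[{a}]] -> [(a, 0)]
--
--     2)
--     Regrouping:
--     [((edge, weight), fold)] -> [{((edge, weight),fold)}]
--
--     3)
--     Making the items match the positives/negatives:
--     [{(edge, weight),fold}] -> [{(edge, fold)}]
--     '''
--     flat = [(z, i) for i, ys in enumerate(xs) for y in ys for z in y]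
--
--     weights = set([x[0][1] for x in flat])
--     weights = list(weights)
--     weights.sort(reverse=True)
--
--     regrouped = []
--     for weight in weights:
--         s = {x for x in flat if x[0][1] == weight}
--         regrouped.append(s)
--
--     final = [{(x[0][0], x[1]) for x in xs} for xs in regrouped]
--
--     return final
-- ===== SOURCE B (Python) =====
-- def flatten_fold_predictions(xs):
--     # One pass builds a dict weight -> {(edge, fold)}; then emit groups by descending weight.
--     groups = {}
--     for i, ys in enumerate(xs):
--         for y in ys:
--             for (edge, weight) in y:
--                 groups.setdefault(weight, set()).add((edge, i))
--     ws = list(groups)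
--     ws.sort(reverse=True)
--     return [groups[w] for w in ws]
-- ===== Notes on version B (the rewrite author's own statement) =====
-- stated objective: alternative
-- what changed: Instead of collecting the distinct weights and rescanning the whole flat list once per weight, B builds a dict from weight to its set of (edge, fold) pairs in a single pass and then emits the groups for the keys sorted descending.
import Mathlib
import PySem

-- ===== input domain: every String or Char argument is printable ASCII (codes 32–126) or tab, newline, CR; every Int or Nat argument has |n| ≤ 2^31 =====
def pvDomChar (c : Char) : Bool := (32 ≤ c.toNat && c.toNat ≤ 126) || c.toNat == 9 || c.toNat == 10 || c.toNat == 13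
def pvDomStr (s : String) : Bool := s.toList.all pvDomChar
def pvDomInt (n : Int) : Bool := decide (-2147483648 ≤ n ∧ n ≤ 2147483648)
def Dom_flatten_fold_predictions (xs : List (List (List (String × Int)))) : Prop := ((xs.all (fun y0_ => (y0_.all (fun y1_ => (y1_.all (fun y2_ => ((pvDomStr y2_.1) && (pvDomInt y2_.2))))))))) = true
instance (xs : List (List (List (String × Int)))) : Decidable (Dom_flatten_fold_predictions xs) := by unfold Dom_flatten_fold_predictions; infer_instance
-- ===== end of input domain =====

-- B replaces A's per-weight rescans of the flat list by one dict-of-sets pass plus a key sort.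


-- ===== PORT A =====
def flatten_fold_predictions (xs : List (List (List (String × Int)))) : List (List (String × Int)) :=
  let flat : List ((String × Int) × Int) :=
    (PySem.List.enumerate xs).flatMap (fun p => p.2.flatMap (fun y => y.map (fun z => (z, p.1))))
  let weights0 : PySem.Set Int := PySem.Set.ofList (flat.map (fun x => x.1.2))
  let weights : List Int := PySem.List.sorted weights0 (fun w => w) true
  let regrouped : List (List ((String × Int) × Int)) :=
    weights.foldl (fun acc weight => acc ++ [PySem.Set.ofList (flat.filter (fun x => x.1.2 == weight))]) []
  regrouped.map (fun s => PySem.Set.ofList (s.map (fun x => (x.1.1, x.2))))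

-- ===== PORT B =====
def flatten_fold_predictions_alt (xs : List (List (List (String × Int)))) : List (List (String × Int)) :=
  let groups : PySem.Dict Int (List (String × Int)) :=
    (PySem.List.enumerate xs).foldl (fun d p =>
      p.2.foldl (fun d y =>
        y.foldl (fun d z =>
          d.insert z.2 (PySem.Set.add (d.getD z.2 PySem.Set.empty) (z.1, p.1))) d) d)
      PySem.Dict.empty
  let ws : List Int := PySem.List.sorted groups.keys (fun w => w) true
  ws.map (fun w => groups.getD w [])

-- ===== PRECONDITION & SPEC =====
def Spec_flatten_fold_predictions (xs : List (List (List (String × Int)))) (out : List (List (String × Int))) : Prop := out = flatten_fold_predictions_alt xs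
instance (xs : List (List (List (String × Int)))) (out : List (List (String × Int))) : Decidable (Spec_flatten_fold_predictions xs out) := by unfold Spec_flatten_fold_predictions; infer_instance

-- ===== CLAIM (what is proved, stated in full; the proofs are below) =====
def Claim_equal_flatten_fold_predictions : Prop := ∀ (xs : List (List (List (String × Int)))), Dom_flatten_fold_predictions xs → Spec_flatten_fold_predictions xs (flatten_fold_predictions xs)

-- ===== LEMMAS AND PROOFS =====

-- dedup before an injected map is dedup after it (general set fact specific to this pairing)
theorem pv_ofList_map {α β : Type} [BEq α] [LawfulBEq α] [BEq β] [LawfulBEq β] (f : α → β) (l : List α) :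
    PySem.Set.ofList ((PySem.Set.ofList l).map f) = PySem.Set.ofList (l.map f) := by
  induction l using List.reverseRecOn with
  | nil => rfl
  | append_singleton xs x ih =>
    by_cases hx : x ∈ xs
    · rw [PySem.Set.ofList_append_singleton,
        PySem.Set.add_of_mem ((PySem.Set.mem_ofList _ _).mpr hx), ih,
        List.map_append, List.map_cons, List.map_nil,
        PySem.Set.ofList_append_singleton,
        PySem.Set.add_of_mem ((PySem.Set.mem_ofList _ _).mpr (List.mem_map_of_mem hx))]
    · rw [PySem.Set.ofList_append_singleton,
        PySem.Set.add_of_not_mem (fun h => hx ((PySem.Set.mem_ofList _ _).mp h)),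
        List.map_append, List.map_cons, List.map_nil,
        PySem.Set.ofList_append_singleton, ih,
        List.map_append, List.map_cons, List.map_nil,
        PySem.Set.ofList_append_singleton]

-- the triple nested dict-building fold is the fold of the same step over A's flat list
theorem pv_fold_flat (xs : List (List (List (String × Int)))) (d : PySem.Dict Int (List (String × Int))) :
    (PySem.List.enumerate xs).foldl (fun d p =>
      p.2.foldl (fun d y =>
        y.foldl (fun d z =>
          d.insert z.2 (PySem.Set.add (d.getD z.2 PySem.Set.empty) (z.1, p.1))) d) d) d
    = ((PySem.List.enumerate xs).flatMap (fun p => p.2.flatMap (fun y => y.map (fun z => (z, p.1))))).foldl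
        (fun d z => d.insert z.1.2 (PySem.Set.add (d.getD z.1.2 PySem.Set.empty) (z.1.1, z.2))) d := by
  rw [List.foldl_flatMap]
  congr 1
  funext d p
  rw [List.foldl_flatMap]
  congr 1
  funext d y
  rw [List.foldl_map]

-- lookup in the built dict = deduped projected filter of the processed list
theorem pv_getD_fold (l : List ((String × Int) × Int)) (d : PySem.Dict Int (List (String × Int))) (w : Int) :
    (l.foldl (fun d z => d.insert z.1.2 (PySem.Set.add (d.getD z.1.2 PySem.Set.empty) (z.1.1, z.2))) d).getD w []
    = PySem.Set.update (d.getD w []) ((l.filter (fun z => z.1.2 == w)).map (fun z => (z.1.1, z.2))) := by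
  induction l generalizing d with
  | nil => simp [PySem.Set.update_nil]
  | cons z l ih =>
    rw [List.foldl_cons, ih]
    by_cases hw : z.1.2 = w
    · subst hw
      simp [PySem.Dict.getD_insert_self, PySem.Set.update_cons, PySem.Set.empty]
    · simp [PySem.Dict.getD_insert, Ne.symm hw, hw]

theorem pv_keys_fold (l : List ((String × Int) × Int)) :
    (l.foldl (fun d z => d.insert z.1.2 (PySem.Set.add (d.getD z.1.2 PySem.Set.empty) (z.1.1, z.2))) (PySem.Dict.empty : PySem.Dict Int (List (String × Int)))).keys
    = PySem.Set.ofList (l.map (fun z => z.1.2)) := by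
  rw [PySem.Dict.keys_foldl_insert_key]
  rw [PySem.Dict.keys_empty, PySem.Set.update_nil_left]

-- ===== VERDICT (by name: the statement is the Claim_ definition above) =====
theorem flatten_fold_predictions_spec : Claim_equal_flatten_fold_predictions := by
  intro xs _
  unfold Spec_flatten_fold_predictions flatten_fold_predictions flatten_fold_predictions_alt
  simp only [pv_fold_flat, pv_keys_fold, PySem.List.foldl_append_singleton_eq_map,
    List.nil_append, List.map_map]
  congr 1
  funext w
  rw [pv_getD_fold, PySem.Dict.getD_empty, PySem.Set.update_nil_left]
  simp only [Function.comp]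
  rw [pv_ofList_map]
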